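-- pv_equiv track=rewrite | github.com/CpyBAgy/text_processor | domain/services.py | replace_letters
-- ===== SOURCE A (Python) =====
-- def replace_letters(text: str, file_number: int) -> str:
--     """Замена английских букв на числа."""
--     result = ""
--     for char in text:
--         order = ord(char)
--         if 65 <= order <= 90:  # Заглавные английские буквы
--             result += str(order - 64 + file_number)
--         elif 97 <= order <= 122:  # Строчные английские буквы
--             result += str(order - 96 + file_number)
--         else:
--             result += char
--     return result
-- ===== SOURCE B (Python) =====
-- def replace_letters(text: str, file_number: int) -> str:
--     """Замена английских букв на числа."""
--     parts = []
--     i = 0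
--     n = len(text)
--     while i < n:
--         j = i
--         while j < n and text[j].isascii() and text[j].isalpha():
--             j += 1
--         if j > i:
--             # a maximal run of ASCII letters: ord(c) % 32 folds case to 1..26
--             parts.append(''.join(str(ord(c) % 32 + file_number) for c in text[i:j]))
--             i = j
--         else:
--             parts.append(text[i])
--             i += 1
--     return ''.join(parts)
-- ===== Notes on version B (the rewrite author's own statement) =====
-- stated objective: alternative
-- what changed: B scans the string with a two-pointer loop over maximal runs of ASCII letters, converts each run with the single case-folding formula ord(c) % 32 + file_number (no uppercase/lowercase branches), and joins the collected segments, instead of A's per-character range branching with string concatenation.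
import Mathlib
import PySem

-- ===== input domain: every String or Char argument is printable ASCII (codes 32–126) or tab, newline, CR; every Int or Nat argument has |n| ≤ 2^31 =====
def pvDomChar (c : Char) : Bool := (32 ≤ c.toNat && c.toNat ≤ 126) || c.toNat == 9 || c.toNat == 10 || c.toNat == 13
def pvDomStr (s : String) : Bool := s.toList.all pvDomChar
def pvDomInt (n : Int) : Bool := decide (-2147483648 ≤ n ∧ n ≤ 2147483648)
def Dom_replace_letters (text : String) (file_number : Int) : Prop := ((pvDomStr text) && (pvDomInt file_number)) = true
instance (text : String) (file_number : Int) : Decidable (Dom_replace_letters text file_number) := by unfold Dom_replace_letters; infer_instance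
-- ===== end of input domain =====

-- B scans maximal runs of ASCII letters with a two-pointer loop, converts each run with the
-- single case-folding formula ord(c) % 32 + file_number, and joins the segments; alternative, same cost.


-- ===== PORT A =====
-- literal port of A: accumulate the result left to right, branching on the character's ordinal
def replace_letters (text : String) (file_number : Int) : String :=
  String.ofList <|
    text.toList.foldl (fun result char =>
      let order : Int := (char.toNat : Int)
      if 65 ≤ order ∧ order ≤ 90 then
        result ++ PySem.Int.toChars (order - 64 + file_number)
      else if 97 ≤ order ∧ order ≤ 122 then
        result ++ PySem.Int.toChars (order - 96 + file_number)
      else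
        result ++ [char]) []

-- ===== PORT B =====
-- c.isascii() and c.isalpha(): exact for the single character c (ASCII alpha = A-Z or a-z)
def rl_isLetter (c : Char) : Bool :=
  (c.toNat ≤ 127) && ((65 ≤ c.toNat && c.toNat ≤ 90) || (97 ≤ c.toNat && c.toNat ≤ 122))

-- ''.join(str(ord(c) % 32 + file_number) for c in run)
def rl_runChars (file_number : Int) (run : List Char) : List Char :=
  run.flatMap (fun c => PySem.Int.toChars (((c.toNat % 32 : Nat) : Int) + file_number))

-- the outer while loop: collect parts; the inner while loop advancing j is the maximal
-- letter run starting at i, i.e. takeWhile/dropWhile on the remaining suffix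
def rl_go (file_number : Int) : List Char → List (List Char)
  | [] => []
  | c :: cs =>
    if h : rl_isLetter c then
      rl_runChars file_number ((c :: cs).takeWhile rl_isLetter)
        :: rl_go file_number ((c :: cs).dropWhile rl_isLetter)
    else
      [c] :: rl_go file_number cs
termination_by l => l.length
decreasing_by
  · simp only [List.dropWhile_cons, h, if_pos]
    exact Nat.lt_succ_of_le (List.length_dropWhile_le _ _)
  · simp

-- ''.join(parts)
def replace_letters_alt (text : String) (file_number : Int) : String :=
  String.ofList ((rl_go file_number text.toList).flatMap id)

-- ===== PRECONDITION & SPEC =====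
def Spec_replace_letters (text : String) (file_number : Int) (out : String) : Prop := out = replace_letters_alt text file_number
instance (text : String) (file_number : Int) (out : String) : Decidable (Spec_replace_letters text file_number out) := by unfold Spec_replace_letters; infer_instance

-- ===== CLAIM (what is proved, stated in full; the proofs are below) =====
def Claim_equal_replace_letters : Prop := ∀ (text : String) (file_number : Int), Dom_replace_letters text file_number → Spec_replace_letters text file_number (replace_letters text file_number)

-- ===== LEMMAS AND PROOFS =====

-- A's per-character replacement as a function (after rewriting the foldl of appends)
def rl_f (file_number : Int) (c : Char) : List Char :=
  if 65 ≤ (c.toNat : Int) ∧ (c.toNat : Int) ≤ 90 then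
    PySem.Int.toChars ((c.toNat : Int) - 64 + file_number)
  else if 97 ≤ (c.toNat : Int) ∧ (c.toNat : Int) ≤ 122 then
    PySem.Int.toChars ((c.toNat : Int) - 96 + file_number)
  else [c]

theorem rl_f_letter (fn : Int) (c : Char) (h : rl_isLetter c = true) :
    rl_f fn c = PySem.Int.toChars (((c.toNat % 32 : Nat) : Int) + fn) := by
  unfold rl_isLetter at h
  simp only [Bool.and_eq_true, Bool.or_eq_true, decide_eq_true_eq] at h
  unfold rl_f
  split_ifs with h1 h2
  · congr 1; omega
  · congr 1; omega
  · exfalso; omega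

theorem rl_f_nonletter (fn : Int) (c : Char) (h : rl_isLetter c = false) :
    rl_f fn c = [c] := by
  unfold rl_isLetter at h
  simp only [Bool.and_eq_false_iff, Bool.or_eq_false_iff, decide_eq_false_iff_not, not_le] at h
  unfold rl_f
  split_ifs with h1 h2
  · exfalso; omega
  · exfalso; omega
  · rfl

theorem rl_flatMap_letters (fn : Int) (l : List Char) (hl : ∀ c ∈ l, rl_isLetter c = true) :
    rl_runChars fn l = l.flatMap (rl_f fn) := by
  induction l with
  | nil => rfl
  | cons c cs ih =>
    simp only [rl_runChars, List.flatMap_cons] at *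
    rw [rl_f_letter fn c (hl c (by simp)), ih (fun d hd => hl d (by simp [hd]))]

theorem rl_go_flatMap (fn : Int) : ∀ (n : Nat) (l : List Char), l.length ≤ n →
    (rl_go fn l).flatMap id = l.flatMap (rl_f fn) := by
  intro n
  induction n with
  | zero =>
    intro l hl
    rw [List.length_eq_zero_iff.mp (Nat.le_zero.mp hl), rl_go]
    rfl
  | succ n ih =>
    intro l hl
    match l with
    | [] => rw [rl_go]; rfl
    | c :: cs =>
      by_cases h : rl_isLetter c = true
      · rw [rl_go, dif_pos h, List.flatMap_cons, id]
        rw [ih _ (by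
          simp only [List.dropWhile_cons, h, if_pos]
          exact Nat.le_trans (List.length_dropWhile_le rl_isLetter cs) (Nat.le_of_succ_le_succ hl))]
        rw [rl_flatMap_letters fn _ (fun d hd => List.mem_takeWhile_imp hd)]
        rw [← List.flatMap_append, List.takeWhile_append_dropWhile]
      · rw [rl_go, dif_neg h, List.flatMap_cons, id, List.flatMap_cons]
        rw [rl_f_nonletter fn c (by simpa using h)]
        rw [ih cs (Nat.le_of_succ_le_succ hl)]

-- ===== VERDICT (by name: the statement is the Claim_ definition above) =====
theorem replace_letters_spec : Claim_equal_replace_letters := by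
  intro text file_number _
  unfold Spec_replace_letters replace_letters replace_letters_alt
  have hfun : (fun (result : List Char) (char : Char) =>
      let order : Int := (char.toNat : Int)
      if 65 ≤ order ∧ order ≤ 90 then
        result ++ PySem.Int.toChars (order - 64 + file_number)
      else if 97 ≤ order ∧ order ≤ 122 then
        result ++ PySem.Int.toChars (order - 96 + file_number)
      else
        result ++ [char])
      = (fun result char => result ++ rl_f file_number char) := by
    funext r c
    unfold rl_f
    dsimp only
    split_ifs <;> rfl
  rw [hfun, PySem.List.foldl_append_eq_flatMap]
  simp only [List.nil_append]
  exact congrArg String.ofList (rl_go_flatMap file_number text.toList.length text.toList le_rfl).symm
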